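-- pv_equiv track=rewrite | github.com/kldtz/CharSplit | kirke/ebrules/dates.py | prefer_effectivedate_over_date
-- ===== SOURCE A (Python) =====
-- from typing import Any, List, Dict, Optional, Tuple
--
-- def prefer_effectivedate_over_date(alist: List[Tuple[int, int, str, str]]) \
--     -> List[Tuple[int, int, str, str]]:
--     start_end_tuple_map = {}  # type: Dict[Tuple[int, int], Tuple[int, int, str, str]]
--     for elt in alist:
--         old_elt = start_end_tuple_map.get((elt[0], elt[1]), [])
--         if elt[3] == 'effectivedate_auto':
--             # effectivedate_auto overrides others
--             start_end_tuple_map[(elt[0], elt[1])] = elt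
--         elif not old_elt:
--             start_end_tuple_map[(elt[0], elt[1])] = elt
--     return list(start_end_tuple_map.values())
-- ===== SOURCE B (Python) =====
-- def prefer_effectivedate_over_date(alist):
--     groups = {}
--     for elt in alist:
--         groups.setdefault((elt[0], elt[1]), []).append(elt)
--     result = []
--     for group in groups.values():
--         winner = group[0]
--         for e in group:
--             if e[3] == 'effectivedate_auto':
--                 winner = e
--         result.append(winner)
--     return result
-- ===== Notes on version B (the rewrite author's own statement) =====
-- stated objective: alternative
-- what changed: Replaces the single overwrite-on-insert dict pass with an explicit group-by-(start,end) pass followed by a per-group winner scan (last 'effectivedate_auto' element, else the group's first element).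
import Mathlib
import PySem

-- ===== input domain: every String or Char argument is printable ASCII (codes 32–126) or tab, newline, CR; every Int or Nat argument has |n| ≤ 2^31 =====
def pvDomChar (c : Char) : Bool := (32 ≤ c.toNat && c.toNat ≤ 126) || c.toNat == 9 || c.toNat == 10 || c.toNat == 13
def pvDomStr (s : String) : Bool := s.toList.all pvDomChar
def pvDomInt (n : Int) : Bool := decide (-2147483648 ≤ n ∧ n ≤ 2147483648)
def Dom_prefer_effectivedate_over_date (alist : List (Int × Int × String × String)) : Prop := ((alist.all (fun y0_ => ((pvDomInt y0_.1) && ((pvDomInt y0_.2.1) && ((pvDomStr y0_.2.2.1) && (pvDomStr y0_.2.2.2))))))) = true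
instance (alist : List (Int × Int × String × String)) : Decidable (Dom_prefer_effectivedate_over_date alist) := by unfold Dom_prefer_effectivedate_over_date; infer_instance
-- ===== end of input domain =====

-- B groups elements by (start, end) and then picks each group's winner, instead of A's
-- single overwrite-on-insert dict pass; alternative decomposition, same cost and same return value.

-- ===== PORT A =====
-- loop body of A: effectivedate_auto always overwrites; otherwise insert only if the key is absent
def pvStepA (m : PySem.Dict (Int × Int) (Int × Int × String × String))
    (elt : Int × Int × String × String) : PySem.Dict (Int × Int) (Int × Int × String × String) :=
  let old := m.get? (elt.1, elt.2.1)
  if elt.2.2.2 == "effectivedate_auto" then m.insert (elt.1, elt.2.1) elt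
  else if old = none then m.insert (elt.1, elt.2.1) elt
  else m

def prefer_effectivedate_over_date (alist : List (Int × Int × String × String)) : List (Int × Int × String × String) :=
  (alist.foldl pvStepA PySem.Dict.empty).values

-- ===== PORT B =====
-- loop body of B's grouping pass: groups.setdefault(key, []).append(elt)
def pvGroupStep (g : PySem.Dict (Int × Int) (List (Int × Int × String × String)))
    (elt : Int × Int × String × String) : PySem.Dict (Int × Int) (List (Int × Int × String × String)) :=
  g.insert (elt.1, elt.2.1) (g.getD (elt.1, elt.2.1) [] ++ [elt])

-- inner loop of B: winner = last 'effectivedate_auto' seen, starting from group[0]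
def pvWinStep (w e : Int × Int × String × String) : Int × Int × String × String :=
  if e.2.2.2 == "effectivedate_auto" then e else w

def pvPickWinner (group : List (Int × Int × String × String)) : Int × Int × String × String :=
  match group with
  | [] => (0, 0, "", "")   -- unreachable: every group is nonempty
  | h :: t => (h :: t).foldl pvWinStep h

def prefer_effectivedate_over_date_alt (alist : List (Int × Int × String × String)) : List (Int × Int × String × String) :=
  ((alist.foldl pvGroupStep PySem.Dict.empty).values).map pvPickWinner

-- ===== PRECONDITION & SPEC =====
def Spec_prefer_effectivedate_over_date (alist : List (Int × Int × String × String)) (out : List (Int × Int × String × String)) : Prop := out = prefer_effectivedate_over_date_alt alist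
instance (alist : List (Int × Int × String × String)) (out : List (Int × Int × String × String)) : Decidable (Spec_prefer_effectivedate_over_date alist out) := by unfold Spec_prefer_effectivedate_over_date; infer_instance

-- ===== CLAIM (what is proved, stated in full; the proofs are below) =====
def Claim_equal_prefer_effectivedate_over_date : Prop := ∀ (alist : List (Int × Int × String × String)), Dom_prefer_effectivedate_over_date alist → Spec_prefer_effectivedate_over_date alist (prefer_effectivedate_over_date alist)

-- ===== LEMMAS AND PROOFS =====

-- 'f' relating B's group entries to A's dict entries: a group collapses to its winner
def pvCollapse (p : (Int × Int) × List (Int × Int × String × String)) :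
    (Int × Int) × (Int × Int × String × String) := (p.1, pvPickWinner p.2)

lemma pick_singleton (e : Int × Int × String × String) : pvPickWinner [e] = e := by
  simp [pvPickWinner, pvWinStep]

lemma pick_append (g : List (Int × Int × String × String)) (e : Int × Int × String × String)
    (hg : g ≠ []) : pvPickWinner (g ++ [e]) = pvWinStep (pvPickWinner g) e := by
  cases g with
  | nil => exact absurd rfl hg
  | cons x t =>
    show pvPickWinner (x :: (t ++ [e])) = _
    simp only [pvPickWinner, List.foldl_append, List.foldl_cons, List.foldl_nil]

lemma eq_of_mem_nodup_fst {α β : Type} (L : List (α × β)) (h : (L.map Prod.fst).Nodup)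
    {p q : α × β} (hp : p ∈ L) (hq : q ∈ L) (he : p.1 = q.1) : p = q := by
  induction L with
  | nil => cases hp
  | cons a t ih =>
    simp only [List.map_cons, List.nodup_cons] at h
    rcases List.mem_cons.mp hp with hp1 | hp1 <;> rcases List.mem_cons.mp hq with hq1 | hq1
    · exact hp1.trans hq1.symm
    · exact absurd (by rw [← hp1, he]; exact List.mem_map_of_mem hq1) h.1
    · exact absurd (by rw [← hq1, ← he]; exact List.mem_map_of_mem hp1) h.1
    · exact ih h.2 hp1 hq1

lemma collapse_fst (p : (Int × Int) × List (Int × Int × String × String)) :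
    (pvCollapse p).1 = p.1 := rfl

lemma step_comm (elt : Int × Int × String × String)
    (L : List ((Int × Int) × List (Int × Int × String × String)))
    (hne : ∀ p ∈ L, p.2 ≠ []) (hnd : (L.map Prod.fst).Nodup) :
    pvStepA ⟨L.map pvCollapse⟩ elt = ⟨(pvGroupStep ⟨L⟩ elt).items.map pvCollapse⟩ := by
  have hcont : (PySem.Dict.mk (L.map pvCollapse)).contains (elt.1, elt.2.1)
      = (PySem.Dict.mk L).contains (elt.1, elt.2.1) := by
    simp [PySem.Dict.contains, List.any_map, Function.comp_def, pvCollapse]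
  cases hc : (PySem.Dict.mk L).contains (elt.1, elt.2.1) with
  | false =>
    have hall : ∀ p ∈ L, ¬((p.1 == (elt.1, elt.2.1)) = true) := by
      simpa [PySem.Dict.contains, List.any_eq_false] using hc
    have hfind : L.find? (fun p => p.1 == (elt.1, elt.2.1)) = none :=
      List.find?_eq_none.mpr hall
    have hfind2 : (L.map pvCollapse).find? (fun p => p.1 == (elt.1, elt.2.1)) = none := by
      rw [List.find?_eq_none]
      intro p hp
      obtain ⟨q, hq, rfl⟩ := List.mem_map.mp hp
      exact hall q hq
    have hc2 : (PySem.Dict.mk (L.map pvCollapse)).contains (elt.1, elt.2.1) = false :=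
      hcont.trans hc
    simp [pvStepA, pvGroupStep, PySem.Dict.insert, hc, hc2, PySem.Dict.get?,
      PySem.Dict.getD, hfind, hfind2, pvCollapse, pick_singleton]
  | true =>
    cases hq : L.find? (fun p => p.1 == (elt.1, elt.2.1)) with
    | none =>
      exfalso
      have hn := List.find?_eq_none.mp hq
      simp only [PySem.Dict.contains, List.any_eq_true] at hc
      obtain ⟨p, hp, hpk⟩ := hc
      exact hn p hp hpk
    | some q =>
      have hqmem : q ∈ L := List.mem_of_find?_eq_some hq
      have hqk : q.1 = (elt.1, elt.2.1) := by
        have h := List.find?_some hq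
        simp at h
        exact h
      have hqne : q.2 ≠ [] := hne q hqmem
      have hfind2 : (L.map pvCollapse).find? (fun p => p.1 == (elt.1, elt.2.1))
          = some (pvCollapse q) := by
        rw [List.find?_map]
        simp only [Function.comp_def, collapse_fst, hq, Option.map_some]
      have hc2 : (PySem.Dict.mk (L.map pvCollapse)).contains (elt.1, elt.2.1) = true :=
        hcont.trans hc
      by_cases helt : (elt.2.2.2 == "effectivedate_auto") = true
      · -- effectivedate_auto: both sides replace the entry at the key
        simp only [pvStepA, pvGroupStep, helt, PySem.Dict.insert, hc, hc2, if_pos, List.map_map]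
        congr 1
        apply List.map_congr_left
        intro p hp
        by_cases hpk : (p.1 == (elt.1, elt.2.1)) = true
        · simp only [Function.comp_def, pvCollapse, hpk, if_pos]
          simp only [PySem.Dict.getD, PySem.Dict.get?, hq, Option.map_some, Option.getD_some]
          rw [pick_append q.2 elt hqne]
          simp [pvWinStep, helt]
        · have hpk' : p.1 ≠ (elt.1, elt.2.1) := fun h => hpk (beq_iff_eq.mpr h)
          simp [pvCollapse, hpk']
      · -- not effectivedate_auto and key present: A keeps the dict, B appends into the group
        have hget2 : (PySem.Dict.mk (L.map pvCollapse)).get? (elt.1, elt.2.1)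
            = some (pvCollapse q).2 := by
          simp [PySem.Dict.get?, hfind2]
        simp only [pvStepA, helt, if_false, hget2, Bool.false_eq_true,
          Option.some_ne_none, pvGroupStep, PySem.Dict.insert, hc, if_pos]
        congr 1
        rw [List.map_map]
        apply List.map_congr_left
        intro p hp
        by_cases hpk : (p.1 == (elt.1, elt.2.1)) = true
        · have hpq : p = q := eq_of_mem_nodup_fst L hnd hp hqmem ((eq_of_beq hpk).trans hqk.symm)
          subst hpq
          simp only [Function.comp_def, hpk, if_pos, pvCollapse]
          simp only [PySem.Dict.getD, PySem.Dict.get?, hq, Option.map_some, Option.getD_some]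
          rw [pick_append p.2 elt hqne]
          simp [pvWinStep, helt, (eq_of_beq hpk).symm]
        · have hpk' : p.1 ≠ (elt.1, elt.2.1) := fun h => hpk (beq_iff_eq.mpr h)
          simp [pvCollapse, hpk']

lemma groupstep_ne (elt : Int × Int × String × String)
    (L : List ((Int × Int) × List (Int × Int × String × String)))
    (hne : ∀ p ∈ L, p.2 ≠ []) :
    ∀ p ∈ (pvGroupStep ⟨L⟩ elt).items, p.2 ≠ [] := by
  intro p hp
  simp only [pvGroupStep, PySem.Dict.insert] at hp
  split at hp
  · simp only [List.mem_map] at hp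
    obtain ⟨q, hq, rfl⟩ := hp
    split
    · simp
    · exact hne q hq
  · simp only [List.mem_append, List.mem_singleton] at hp
    rcases hp with hp | hp
    · exact hne p hp
    · subst hp; simp

lemma groupstep_nodup (elt : Int × Int × String × String)
    (L : List ((Int × Int) × List (Int × Int × String × String)))
    (hnd : (L.map Prod.fst).Nodup) :
    ((pvGroupStep ⟨L⟩ elt).items.map Prod.fst).Nodup := by
  simp only [pvGroupStep, PySem.Dict.insert]
  split
  · rename_i hc
    simp only [List.map_map]
    convert hnd using 2
    funext p
    by_cases hpk : p.1 = (elt.1, elt.2.1)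
    · simp [hpk]
    · simp [beq_iff_eq, hpk]
  · rename_i hc
    have hnotmem : (elt.1, elt.2.1) ∉ L.map Prod.fst := by
      intro hmem
      obtain ⟨p, hp, hpk⟩ := List.mem_map.mp hmem
      apply hc
      simp only [PySem.Dict.contains, List.any_eq_true]
      exact ⟨p, hp, beq_iff_eq.mpr hpk⟩
    simp only [List.map_append, List.map_cons, List.map_nil]
    rw [List.nodup_append]
    refine ⟨hnd, List.nodup_singleton _, ?_⟩
    intro a ha b hb
    rw [List.mem_singleton] at hb
    subst hb
    intro heq
    exact hnotmem (heq ▸ ha)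

lemma fold_comm (rest : List (Int × Int × String × String)) :
    ∀ (L : List ((Int × Int) × List (Int × Int × String × String))),
    (∀ p ∈ L, p.2 ≠ []) → (L.map Prod.fst).Nodup →
    rest.foldl pvStepA ⟨L.map pvCollapse⟩ = ⟨(rest.foldl pvGroupStep ⟨L⟩).items.map pvCollapse⟩ := by
  induction rest with
  | nil => intro L _ _; rfl
  | cons e rest ih =>
    intro L hne hnd
    rw [List.foldl_cons, List.foldl_cons, step_comm e L hne hnd]
    exact ih (pvGroupStep ⟨L⟩ e).items (groupstep_ne e L hne) (groupstep_nodup e L hnd)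

-- ===== VERDICT (by name: the statement is the Claim_ definition above) =====
theorem prefer_effectivedate_over_date_spec : Claim_equal_prefer_effectivedate_over_date := by
  intro alist _
  show prefer_effectivedate_over_date alist = prefer_effectivedate_over_date_alt alist
  have h := fold_comm alist [] (by simp) (by simp)
  simp only [List.map_nil] at h
  show (alist.foldl pvStepA PySem.Dict.empty).values = _
  rw [show (PySem.Dict.empty : PySem.Dict (Int × Int) (Int × Int × String × String)) = ⟨[]⟩ from rfl] at *
  rw [h]
  simp [PySem.Dict.values, List.map_map, pvCollapse, prefer_effectivedate_over_date_alt,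
    PySem.Dict.empty, Function.comp]
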